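-- pv_equiv track=rewrite | github.com/santpandey/capstone-blender | agents/coordinator_agent.py | _are_categories_compatible
-- ===== SOURCE A (Python) =====
-- def _are_categories_compatible(cat1: str, cat2: str) -> bool:
--     """Check if two API categories are compatible"""
--
--     compatible_groups = [
--         {"mesh_operators", "object_operators"},
--         {"shader_nodes", "material_operators"},
--         {"animation_operators", "object_operators"},
--         {"geometry_nodes", "mesh_operators"}
--     ]
--
--     for group in compatible_groups:
--         if cat1 in group and cat2 in group:
--             return True
--
--     return cat1 == cat2
-- ===== SOURCE B (Python) =====
-- # B: symmetric adjacency table built once; one dict lookup instead of scanning the four groups.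
-- _COMPATIBLE_PARTNERS = {
--     "mesh_operators": frozenset({"object_operators", "geometry_nodes"}),
--     "object_operators": frozenset({"mesh_operators", "animation_operators"}),
--     "shader_nodes": frozenset({"material_operators"}),
--     "material_operators": frozenset({"shader_nodes"}),
--     "animation_operators": frozenset({"object_operators"}),
--     "geometry_nodes": frozenset({"mesh_operators"}),
-- }
--
-- def _are_categories_compatible(cat1: str, cat2: str) -> bool:
--     """Check if two API categories are compatible"""
--     return cat1 == cat2 or cat2 in _COMPATIBLE_PARTNERS.get(cat1, frozenset())
-- ===== Notes on version B (the rewrite author's own statement) =====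
-- stated objective: simpler
-- what changed: Replaced the loop over four two-element groups (two membership tests per group) with a precomputed symmetric adjacency dict and a single lookup: cat1 == cat2 or cat2 in partners[cat1].
import Mathlib
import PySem

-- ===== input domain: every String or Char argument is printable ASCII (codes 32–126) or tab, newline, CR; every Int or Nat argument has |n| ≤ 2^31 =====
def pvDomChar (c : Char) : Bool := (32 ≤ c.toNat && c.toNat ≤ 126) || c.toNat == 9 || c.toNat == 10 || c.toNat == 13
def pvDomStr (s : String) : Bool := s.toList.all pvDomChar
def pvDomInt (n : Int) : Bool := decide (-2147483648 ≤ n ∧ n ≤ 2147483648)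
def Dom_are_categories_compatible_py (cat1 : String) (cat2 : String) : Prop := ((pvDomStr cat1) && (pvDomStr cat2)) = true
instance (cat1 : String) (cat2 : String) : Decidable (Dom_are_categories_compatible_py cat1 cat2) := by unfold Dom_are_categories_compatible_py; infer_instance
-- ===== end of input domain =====

-- B replaces A's scan over the four two-element groups by one lookup in a precomputed
-- symmetric adjacency table (objective: simpler).

-- ===== PORT A =====
-- the literal list of sets from A
def acGroups : List (PySem.Set String) :=
  [PySem.Set.ofList ["mesh_operators", "object_operators"],
   PySem.Set.ofList ["shader_nodes", "material_operators"],
   PySem.Set.ofList ["animation_operators", "object_operators"],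
   PySem.Set.ofList ["geometry_nodes", "mesh_operators"]]

-- the 'for group in compatible_groups' loop with its early return
def acLoop (cat1 cat2 : String) : List (PySem.Set String) → Bool
  | [] => cat1 == cat2
  | g :: rest =>
      if PySem.Set.contains g cat1 && PySem.Set.contains g cat2 then true
      else acLoop cat1 cat2 rest

def are_categories_compatible_py (cat1 : String) (cat2 : String) : Bool :=
  acLoop cat1 cat2 acGroups

-- ===== PORT B =====
-- the precomputed symmetric adjacency table _COMPATIBLE_PARTNERS
def acPartners : PySem.Dict String (PySem.Set String) :=
  PySem.Dict.ofList
    [("mesh_operators", PySem.Set.ofList ["object_operators", "geometry_nodes"]),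
     ("object_operators", PySem.Set.ofList ["mesh_operators", "animation_operators"]),
     ("shader_nodes", PySem.Set.ofList ["material_operators"]),
     ("material_operators", PySem.Set.ofList ["shader_nodes"]),
     ("animation_operators", PySem.Set.ofList ["object_operators"]),
     ("geometry_nodes", PySem.Set.ofList ["mesh_operators"])]

def are_categories_compatible_py_alt (cat1 : String) (cat2 : String) : Bool :=
  cat1 == cat2 || PySem.Set.contains (PySem.Dict.getD acPartners cat1 PySem.Set.empty) cat2

-- ===== PRECONDITION & SPEC =====
def Spec_are_categories_compatible_py (cat1 : String) (cat2 : String) (out : Bool) : Prop := out = are_categories_compatible_py_alt cat1 cat2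
instance (cat1 : String) (cat2 : String) (out : Bool) : Decidable (Spec_are_categories_compatible_py cat1 cat2 out) := by unfold Spec_are_categories_compatible_py; infer_instance

-- ===== CLAIM (what is proved, stated in full; the proofs are below) =====
def Claim_equal_are_categories_compatible_py : Prop := ∀ (cat1 : String) (cat2 : String), Dom_are_categories_compatible_py cat1 cat2 → Spec_are_categories_compatible_py cat1 cat2 (are_categories_compatible_py cat1 cat2)

-- ===== LEMMAS AND PROOFS =====

theorem acA_mesh (c2 : String) : are_categories_compatible_py "mesh_operators" c2 = (c2 == "mesh_operators" || c2 == "object_operators" || c2 == "geometry_nodes") := by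
  simp [are_categories_compatible_py, acGroups, acLoop, PySem.Set.contains, PySem.Set.ofList, PySem.Set.add]
  by_cases g1 : c2 = "mesh_operators" <;> by_cases g2 : c2 = "object_operators" <;> by_cases g3 : c2 = "geometry_nodes" <;> simp [g1, g2, g3, beq_eq_decide, eq_comm]

theorem acB_mesh (c2 : String) : are_categories_compatible_py_alt "mesh_operators" c2 = (c2 == "mesh_operators" || c2 == "object_operators" || c2 == "geometry_nodes") := by
  simp [are_categories_compatible_py_alt, acPartners, PySem.Dict.getD, PySem.Dict.get?, PySem.Dict.ofList,
        PySem.Dict.update, PySem.Dict.insert, PySem.Dict.empty]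
  by_cases g1 : c2 = "mesh_operators" <;> by_cases g2 : c2 = "object_operators" <;> by_cases g3 : c2 = "geometry_nodes" <;> simp [g1, g2, g3, beq_eq_decide, eq_comm]

theorem acA_obj (c2 : String) : are_categories_compatible_py "object_operators" c2 = (c2 == "mesh_operators" || c2 == "object_operators" || c2 == "animation_operators") := by
  simp [are_categories_compatible_py, acGroups, acLoop, PySem.Set.contains, PySem.Set.ofList, PySem.Set.add]
  by_cases g1 : c2 = "mesh_operators" <;> by_cases g2 : c2 = "object_operators" <;> by_cases g3 : c2 = "animation_operators" <;> simp [g1, g2, g3, beq_eq_decide, eq_comm]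

theorem acB_obj (c2 : String) : are_categories_compatible_py_alt "object_operators" c2 = (c2 == "mesh_operators" || c2 == "object_operators" || c2 == "animation_operators") := by
  simp [are_categories_compatible_py_alt, acPartners, PySem.Dict.getD, PySem.Dict.get?, PySem.Dict.ofList,
        PySem.Dict.update, PySem.Dict.insert, PySem.Dict.empty]
  by_cases g1 : c2 = "mesh_operators" <;> by_cases g2 : c2 = "object_operators" <;> by_cases g3 : c2 = "animation_operators" <;> simp [g1, g2, g3, beq_eq_decide, eq_comm]

theorem acA_shad (c2 : String) : are_categories_compatible_py "shader_nodes" c2 = (c2 == "shader_nodes" || c2 == "material_operators") := by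
  simp [are_categories_compatible_py, acGroups, acLoop, PySem.Set.contains, PySem.Set.ofList, PySem.Set.add]
  by_cases g1 : c2 = "shader_nodes" <;> by_cases g2 : c2 = "material_operators" <;> simp [g1, g2, beq_eq_decide, eq_comm]

theorem acB_shad (c2 : String) : are_categories_compatible_py_alt "shader_nodes" c2 = (c2 == "shader_nodes" || c2 == "material_operators") := by
  simp [are_categories_compatible_py_alt, acPartners, PySem.Dict.getD, PySem.Dict.get?, PySem.Dict.ofList,
        PySem.Dict.update, PySem.Dict.insert, PySem.Dict.empty]
  by_cases g1 : c2 = "shader_nodes" <;> by_cases g2 : c2 = "material_operators" <;> simp [g1, g2, beq_eq_decide, eq_comm]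

theorem acA_mat (c2 : String) : are_categories_compatible_py "material_operators" c2 = (c2 == "shader_nodes" || c2 == "material_operators") := by
  simp [are_categories_compatible_py, acGroups, acLoop, PySem.Set.contains, PySem.Set.ofList, PySem.Set.add]
  by_cases g1 : c2 = "shader_nodes" <;> by_cases g2 : c2 = "material_operators" <;> simp [g1, g2, beq_eq_decide, eq_comm]

theorem acB_mat (c2 : String) : are_categories_compatible_py_alt "material_operators" c2 = (c2 == "shader_nodes" || c2 == "material_operators") := by
  simp [are_categories_compatible_py_alt, acPartners, PySem.Dict.getD, PySem.Dict.get?, PySem.Dict.ofList,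
        PySem.Dict.update, PySem.Dict.insert, PySem.Dict.empty]
  by_cases g1 : c2 = "shader_nodes" <;> by_cases g2 : c2 = "material_operators" <;> simp [g1, g2, beq_eq_decide, eq_comm]

theorem acA_anim (c2 : String) : are_categories_compatible_py "animation_operators" c2 = (c2 == "animation_operators" || c2 == "object_operators") := by
  simp [are_categories_compatible_py, acGroups, acLoop, PySem.Set.contains, PySem.Set.ofList, PySem.Set.add]
  by_cases g1 : c2 = "animation_operators" <;> by_cases g2 : c2 = "object_operators" <;> simp [g1, g2, beq_eq_decide, eq_comm]

theorem acB_anim (c2 : String) : are_categories_compatible_py_alt "animation_operators" c2 = (c2 == "animation_operators" || c2 == "object_operators") := by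
  simp [are_categories_compatible_py_alt, acPartners, PySem.Dict.getD, PySem.Dict.get?, PySem.Dict.ofList,
        PySem.Dict.update, PySem.Dict.insert, PySem.Dict.empty]
  by_cases g1 : c2 = "animation_operators" <;> by_cases g2 : c2 = "object_operators" <;> simp [g1, g2, beq_eq_decide, eq_comm]

theorem acA_geo (c2 : String) : are_categories_compatible_py "geometry_nodes" c2 = (c2 == "geometry_nodes" || c2 == "mesh_operators") := by
  simp [are_categories_compatible_py, acGroups, acLoop, PySem.Set.contains, PySem.Set.ofList, PySem.Set.add]
  by_cases g1 : c2 = "geometry_nodes" <;> by_cases g2 : c2 = "mesh_operators" <;> simp [g1, g2, beq_eq_decide, eq_comm]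

theorem acB_geo (c2 : String) : are_categories_compatible_py_alt "geometry_nodes" c2 = (c2 == "geometry_nodes" || c2 == "mesh_operators") := by
  simp [are_categories_compatible_py_alt, acPartners, PySem.Dict.getD, PySem.Dict.get?, PySem.Dict.ofList,
        PySem.Dict.update, PySem.Dict.insert, PySem.Dict.empty]
  by_cases g1 : c2 = "geometry_nodes" <;> by_cases g2 : c2 = "mesh_operators" <;> simp [g1, g2, beq_eq_decide, eq_comm]

theorem acA_default (c1 c2 : String) (h1 : c1 ≠ "mesh_operators") (h2 : c1 ≠ "object_operators") (h3 : c1 ≠ "shader_nodes") (h4 : c1 ≠ "material_operators") (h5 : c1 ≠ "animation_operators") (h6 : c1 ≠ "geometry_nodes") :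
    are_categories_compatible_py c1 c2 = (c1 == c2) := by
  simp [are_categories_compatible_py, acGroups, acLoop, PySem.Set.contains, PySem.Set.ofList, PySem.Set.add,
        h1, h2, h3, h4, h5, h6]

theorem acB_default (c1 c2 : String) (h1 : c1 ≠ "mesh_operators") (h2 : c1 ≠ "object_operators") (h3 : c1 ≠ "shader_nodes") (h4 : c1 ≠ "material_operators") (h5 : c1 ≠ "animation_operators") (h6 : c1 ≠ "geometry_nodes") :
    are_categories_compatible_py_alt c1 c2 = (c1 == c2) := by
  have e1 : ("mesh_operators" == c1) = false := by simp [beq_eq_decide]; exact fun h => h1 h.symm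
  have e2 : ("object_operators" == c1) = false := by simp [beq_eq_decide]; exact fun h => h2 h.symm
  have e3 : ("shader_nodes" == c1) = false := by simp [beq_eq_decide]; exact fun h => h3 h.symm
  have e4 : ("material_operators" == c1) = false := by simp [beq_eq_decide]; exact fun h => h4 h.symm
  have e5 : ("animation_operators" == c1) = false := by simp [beq_eq_decide]; exact fun h => h5 h.symm
  have e6 : ("geometry_nodes" == c1) = false := by simp [beq_eq_decide]; exact fun h => h6 h.symm
  simp [are_categories_compatible_py_alt, acPartners, PySem.Dict.getD, PySem.Dict.get?, PySem.Dict.ofList,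
        PySem.Dict.update, PySem.Dict.insert, PySem.Dict.empty, e1, e2, e3, e4, e5, e6]

-- ===== VERDICT (by name: the statement is the Claim_ definition above) =====
theorem are_categories_compatible_py_spec : Claim_equal_are_categories_compatible_py := by
  intro cat1 cat2 _
  unfold Spec_are_categories_compatible_py
  by_cases h1 : cat1 = "mesh_operators"
  · subst h1; rw [acA_mesh, acB_mesh]
  by_cases h2 : cat1 = "object_operators"
  · subst h2; rw [acA_obj, acB_obj]
  by_cases h3 : cat1 = "shader_nodes"
  · subst h3; rw [acA_shad, acB_shad]
  by_cases h4 : cat1 = "material_operators"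
  · subst h4; rw [acA_mat, acB_mat]
  by_cases h5 : cat1 = "animation_operators"
  · subst h5; rw [acA_anim, acB_anim]
  by_cases h6 : cat1 = "geometry_nodes"
  · subst h6; rw [acA_geo, acB_geo]
  rw [acA_default cat1 cat2 h1 h2 h3 h4 h5 h6, acB_default cat1 cat2 h1 h2 h3 h4 h5 h6]
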